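-- pv_equiv track=rewrite | github.com/SoulGP/Portfolio-FIUBA | materias/introduccion-del-desarrollo-de-software/Introdex-Web/IntroDex/app/alembic/versions/2024_11_07_1619-34651d86464b_poblar_la_tabla_categoria.py | buscar_identifier_por_damage_class_id
-- ===== SOURCE A (Python) =====
-- def buscar_identifier_por_damage_class_id(
--     damage_class_data, move_damage_class_id, local_language_id
-- ):
--     for damage_class in damage_class_data:
--         if (
--             int(damage_class["move_damage_class_id"]) == move_damage_class_id
--             and int(damage_class["local_language_id"]) == local_language_id
--         ):
--             return damage_class["name"]
--
--     for damage_class in damage_class_data: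
--         if (
--             int(damage_class["move_damage_class_id"]) == move_damage_class_id
--             and int(damage_class["local_language_id"]) == 9  # ingles
--         ):
--             return damage_class["name"]
--
--     return "Unknown"
-- ===== SOURCE B (Python) =====
-- def buscar_identifier_por_damage_class_id(
--     damage_class_data, move_damage_class_id, local_language_id
-- ):
--     # Single pass: return the first local-language match immediately,
--     # remember the first English (id 9) match as a fallback.
--     english_match = None
--     for damage_class in damage_class_data:
--         if int(damage_class["move_damage_class_id"]) != move_damage_class_id:
--             continue
--         if int(damage_class["local_language_id"]) == local_language_id:
--             return damage_class["name"]
--         if english_match is None and int(damage_class["local_language_id"]) == 9: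
--             english_match = damage_class["name"]
--     return english_match if english_match is not None else "Unknown"
-- ===== Notes on version B (the rewrite author's own statement) =====
-- stated objective: alternative
-- what changed: Replaces A's two full scans (local pass, then a second English pass over the whole list) by one single pass that returns a local match immediately and carries the first English match in a fallback variable.
import Mathlib
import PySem

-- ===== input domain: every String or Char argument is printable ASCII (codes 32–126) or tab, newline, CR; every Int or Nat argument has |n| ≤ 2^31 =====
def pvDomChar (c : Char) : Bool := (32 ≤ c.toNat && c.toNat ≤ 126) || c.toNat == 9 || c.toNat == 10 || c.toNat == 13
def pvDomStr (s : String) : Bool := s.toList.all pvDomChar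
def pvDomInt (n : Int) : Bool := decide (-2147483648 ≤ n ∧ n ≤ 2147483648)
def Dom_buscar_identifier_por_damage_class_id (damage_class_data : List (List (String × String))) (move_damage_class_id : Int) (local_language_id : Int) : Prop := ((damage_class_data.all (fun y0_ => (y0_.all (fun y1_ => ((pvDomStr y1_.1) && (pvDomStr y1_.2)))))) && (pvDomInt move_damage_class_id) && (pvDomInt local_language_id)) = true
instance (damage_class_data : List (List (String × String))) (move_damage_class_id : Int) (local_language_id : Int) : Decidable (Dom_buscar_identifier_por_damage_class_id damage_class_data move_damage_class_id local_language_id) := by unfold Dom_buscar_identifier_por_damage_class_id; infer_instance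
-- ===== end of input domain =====

-- B replaces A's two full scans by one single pass with an English-fallback variable (alternative decomposition).


-- shared helpers: dict lookup (first match) and int(damage_class[k])
def pvLookup (d : List (String × String)) (k : String) : Option String :=
  (PySem.Dict.mk d).get? k
def pvIdOf (d : List (String × String)) (k : String) : Option Int :=
  (pvLookup d k).bind PySem.Int.ofStr?

-- ===== PORT A =====
-- first loop of A: first entry matching (class id, local language), its name
def pvScanLocal (xs : List (List (String × String))) (m l : Int) : Option String :=
  match xs with
  | [] => none
  | d :: rest =>
    if pvIdOf d "move_damage_class_id" = some m ∧ pvIdOf d "local_language_id" = some l then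
      some ((pvLookup d "name").getD "")          -- KeyError on missing "name" excluded by Pre_
    else pvScanLocal rest m l

-- second loop of A: first entry matching (class id, English = 9), its name
def pvScanEng (xs : List (List (String × String))) (m : Int) : Option String :=
  match xs with
  | [] => none
  | d :: rest =>
    if pvIdOf d "move_damage_class_id" = some m ∧ pvIdOf d "local_language_id" = some 9 then
      some ((pvLookup d "name").getD "")
    else pvScanEng rest m

def buscar_identifier_por_damage_class_id (damage_class_data : List (List (String × String))) (move_damage_class_id : Int) (local_language_id : Int) : String :=
  match pvScanLocal damage_class_data move_damage_class_id local_language_id with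
  | some n => n
  | none =>
    match pvScanEng damage_class_data move_damage_class_id with
    | some n => n
    | none => "Unknown"

-- ===== PORT B =====
-- single pass carrying the English fallback (english_match)
def pvScanB (xs : List (List (String × String))) (m l : Int) (fb : Option String) : String :=
  match xs with
  | [] => fb.getD "Unknown"
  | d :: rest =>
    if pvIdOf d "move_damage_class_id" ≠ some m then pvScanB rest m l fb
    else if pvIdOf d "local_language_id" = some l then (pvLookup d "name").getD ""
    else if fb = none ∧ pvIdOf d "local_language_id" = some 9 then
      pvScanB rest m l (some ((pvLookup d "name").getD ""))
    else pvScanB rest m l fb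

def buscar_identifier_por_damage_class_id_alt (damage_class_data : List (List (String × String))) (move_damage_class_id : Int) (local_language_id : Int) : String :=
  pvScanB damage_class_data move_damage_class_id local_language_id none

-- ===== PRECONDITION & SPEC =====
-- Pre_ excludes the inputs on which Python raises (KeyError on a missing
-- "move_damage_class_id"/"local_language_id"/"name" key, ValueError on a non-integer id string).
-- It asks this of EVERY entry, slightly narrower than A's scan which may return before touching
-- a malformed later entry (an exact condition would re-simulate the scan).
def Pre_buscar_identifier_por_damage_class_id (damage_class_data : List (List (String × String))) (move_damage_class_id : Int) (local_language_id : Int) : Prop :=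
  ∀ d ∈ damage_class_data,
    (pvIdOf d "move_damage_class_id").isSome = true ∧
    (pvIdOf d "local_language_id").isSome = true ∧
    (pvLookup d "name").isSome = true
instance (damage_class_data : List (List (String × String))) (move_damage_class_id : Int) (local_language_id : Int) : Decidable (Pre_buscar_identifier_por_damage_class_id damage_class_data move_damage_class_id local_language_id) := by unfold Pre_buscar_identifier_por_damage_class_id; infer_instance

def pvWitness_buscar_identifier_por_damage_class_id : (List (List (String × String))) × Int × Int :=
  ([[("move_damage_class_id", "1"), ("local_language_id", "9"), ("name", "physical")]], 1, 7)

def Spec_buscar_identifier_por_damage_class_id (damage_class_data : List (List (String × String))) (move_damage_class_id : Int) (local_language_id : Int) (out : String) : Prop := out = buscar_identifier_por_damage_class_id_alt damage_class_data move_damage_class_id local_language_id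
instance (damage_class_data : List (List (String × String))) (move_damage_class_id : Int) (local_language_id : Int) (out : String) : Decidable (Spec_buscar_identifier_por_damage_class_id damage_class_data move_damage_class_id local_language_id out) := by unfold Spec_buscar_identifier_por_damage_class_id; infer_instance

-- ===== CLAIM (what is proved, stated in full; the proofs are below) =====
def Claim_equal_buscar_identifier_por_damage_class_id : Prop := ∀ (damage_class_data : List (List (String × String))) (move_damage_class_id : Int) (local_language_id : Int), Dom_buscar_identifier_por_damage_class_id damage_class_data move_damage_class_id local_language_id → Pre_buscar_identifier_por_damage_class_id damage_class_data move_damage_class_id local_language_id → Spec_buscar_identifier_por_damage_class_id damage_class_data move_damage_class_id local_language_id (buscar_identifier_por_damage_class_id damage_class_data move_damage_class_id local_language_id)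

-- ===== LEMMAS AND PROOFS =====

-- Invariant of B's single pass: a local match wins; otherwise the fallback, if already
-- set, wins over any later English match; otherwise the first English match; else "Unknown".
lemma pvScanB_eq (m l : Int) (xs : List (List (String × String))) (fb : Option String) :
    pvScanB xs m l fb =
      match pvScanLocal xs m l with
      | some n => n
      | none => (fb.or (pvScanEng xs m)).getD "Unknown" := by
  induction xs generalizing fb with
  | nil => simp [pvScanB, pvScanLocal, pvScanEng]
  | cons d rest ih =>
    by_cases hm : pvIdOf d "move_damage_class_id" = some m
    · by_cases hl : pvIdOf d "local_language_id" = some l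
      · simp [pvScanB, pvScanLocal, hm, hl]
      · by_cases h9 : pvIdOf d "local_language_id" = some 9
        · -- English candidate: fallback becomes fb.or (some name)
          have hl9 : ¬ ((9 : Int) = l) := fun h => hl (h ▸ h9)
          cases fb with
          | none =>
            simp [pvScanB, pvScanLocal, pvScanEng, hm, h9, hl9, ih]
          | some v =>
            simp [pvScanB, pvScanLocal, hm, h9, hl9, ih, Option.or]
        · simp [pvScanB, pvScanLocal, pvScanEng, hm, hl, h9, ih]
    · simp [pvScanB, pvScanLocal, pvScanEng, hm, ih]

-- ===== VERDICT (by name: the statement is the Claim_ definition above) =====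
theorem buscar_identifier_por_damage_class_id_spec : Claim_equal_buscar_identifier_por_damage_class_id := by
  intro data m l _ _
  unfold Spec_buscar_identifier_por_damage_class_id
  unfold buscar_identifier_por_damage_class_id buscar_identifier_por_damage_class_id_alt
  rw [pvScanB_eq]
  cases pvScanLocal data m l <;> cases pvScanEng data m <;> simp [Option.or]
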